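-- pv_equiv track=rewrite | github.com/IumoInfinium/cp | google_competitions/Codejam/2022/d1e6.py | generate
-- ===== SOURCE A (Python) =====
-- def generate(d):
--     d=sorted(d)
--     max_size=1
--     for i in range(1,min(d)):
--         d2=[d for d in d[i-1:]]
--         size=0
--         while(len(d2)>0):
--             if(d2.pop(0)>=i+size):
--                 size+=1
--         max_size=max(max_size,size)
--     return max_size
-- ===== SOURCE B (Python) =====
-- def generate(d):
--     s = sorted(d)
--     best = 1
--     for i in range(1, min(d)):
--         # scan the suffix s[i-1:] from its largest element down, maintaining the
--         # running minimum of the "slack" v + t - i; the answer for threshold i is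
--         # the last position t whose slack-minimum still covers t.
--         top = list(reversed(s[i - 1:]))
--         run = None
--         k = 0
--         t = 0
--         for v in top:
--             t += 1
--             f = v + t - i
--             if run is None or f < run:
--                 run = f
--             if t <= run:
--                 k = t
--             else:
--                 break
--         best = max(best, k)
--     return best
-- ===== Notes on version B (the rewrite author's own statement) =====
-- stated objective: alternative
-- what changed: The per-threshold greedy front-to-back scan with pop(0) is replaced by a descending scan over the suffix's largest elements that maintains a running minimum of slacks (element + rank - threshold) and stops at the first rank the minimum fails to cover, proved to compute the same maximal feasible count.
-- outside the precondition, e.g. on generate([]): A raises ValueError, B raises ValueError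
import Mathlib
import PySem

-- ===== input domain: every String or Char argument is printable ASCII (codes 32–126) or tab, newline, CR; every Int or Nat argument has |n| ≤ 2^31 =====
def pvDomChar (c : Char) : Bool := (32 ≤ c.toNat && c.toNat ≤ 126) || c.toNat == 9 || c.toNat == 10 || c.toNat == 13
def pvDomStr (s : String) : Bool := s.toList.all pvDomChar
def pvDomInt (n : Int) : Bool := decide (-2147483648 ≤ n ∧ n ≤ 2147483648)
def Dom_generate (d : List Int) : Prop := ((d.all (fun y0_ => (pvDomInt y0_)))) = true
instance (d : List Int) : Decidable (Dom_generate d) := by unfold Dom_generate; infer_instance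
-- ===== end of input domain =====

-- B replaces the per-threshold greedy front-to-back scan by a descending scan over the
-- suffix's largest elements that maintains a running minimum of slacks (alternative
-- algorithm, same cost class); return values proved equal on nonempty lists.

-- ===== PORT A =====
-- while d2: if d2.pop(0) >= i + size: size += 1
def aGreedy : List Int → Int → Int → Int
  | [], _, size => size
  | x :: rest, i, size => aGreedy rest i (if x ≥ i + size then size + 1 else size)

def generate (d : List Int) : Int :=
  let s := PySem.List.sorted d (fun x => x) false
  match PySem.List.min? d (fun x => x) with
  | none => 0  -- unreachable: Python's min([]) raises ValueError, excluded by Pre_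
  | some mn =>
    (PySem.List.pyRange 1 mn 1).foldl
      (fun max_size i =>
        let d2 := (PySem.List.slice s (some (i - 1)) none).map (fun x => x)
        max max_size (aGreedy d2 i 0)) 1

-- ===== PORT B =====
-- descending scan with running minimum of slacks v + t - i; stops at first failure
def bScan : List Int → Int → Int → Option Int → Int → Int
  | [], _, _, _, k => k
  | v :: rest, i, t, run, k =>
    let t' := t + 1
    let f := v + t' - i
    let run' := match run with
      | none => f
      | some r => if f < r then f else r
    if t' ≤ run' then bScan rest i t' (some run') t'
    else k

def generate_alt (d : List Int) : Int :=
  let s := PySem.List.sorted d (fun x => x) false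
  match PySem.List.min? d (fun x => x) with
  | none => 0  -- unreachable: Python's min([]) raises ValueError, excluded by Pre_
  | some mn =>
    (PySem.List.pyRange 1 mn 1).foldl
      (fun best i =>
        let top := (PySem.List.slice s (some (i - 1)) none).reverse
        max best (bScan top i 0 none 0)) 1

-- ===== PRECONDITION & SPEC =====
-- Pre_ excludes only the empty list, on which A (and B) raise ValueError via min([]).
def Pre_generate (d : List Int) : Prop := d ≠ []
instance (d : List Int) : Decidable (Pre_generate d) := by unfold Pre_generate; infer_instance
def pvWitness_generate : List Int := ([3, 1, 4])

def Spec_generate (d : List Int) (out : Int) : Prop := out = generate_alt d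
instance (d : List Int) (out : Int) : Decidable (Spec_generate d out) := by unfold Spec_generate; infer_instance

-- ===== CLAIM (what is proved, stated in full; the proofs are below) =====
def Claim_equal_generate : Prop := ∀ (d : List Int), Dom_generate d → Pre_generate d → Spec_generate d (generate d)

-- ===== LEMMAS AND PROOFS =====

-- slack of position j (0-based from the largest element) at threshold i
def fv (w : List Int) (i : Int) (j : Nat) : Int := w.getD j 0 + ((j : Int) + 1) - i

-- k elements are feasible iff every slack among the top k covers k
def feasB (w : List Int) (i : Int) (k : Nat) : Bool :=
  (List.range k).all (fun j => decide ((k : Int) ≤ fv w i j))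

-- the specification both inner loops compute: largest feasible k
def FR (w : List Int) (i : Int) : Nat :=
  Nat.findGreatest (fun k => feasB w i k = true) w.length

lemma feasB_iff (w : List Int) (i : Int) (k : Nat) :
    feasB w i k = true ↔ ∀ j < k, (k : Int) ≤ fv w i j := by
  simp [feasB]

lemma feasB_zero (w : List Int) (i : Int) : feasB w i 0 = true := by
  simp [feasB]

-- greedy in "relative demand" form
def G : List Int → Int → Int
  | [], _ => 0
  | x :: r, i => if i ≤ x then 1 + G r (i + 1) else G r i

lemma aGreedy_eq_G (u : List Int) : ∀ (i size : Int), aGreedy u i size = size + G u (i + size) := by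
  induction u with
  | nil => intro i size; simp [aGreedy, G]
  | cons x r ih =>
    intro i size
    by_cases h : i + size ≤ x
    · rw [aGreedy, if_pos (by omega), ih, G, if_pos h,
        show i + (size + 1) = i + size + 1 from by ring]
      ring
    · rw [aGreedy, if_neg (by omega), ih, G, if_neg h]

lemma bScan_inv (W : List Int) (i : Int) :
    ∀ (n t : Nat) (run : Int), W.length - t = n → t ≤ W.length → 1 ≤ t →
      ((t : Int) ≤ run) →
      (∀ j < t, run ≤ fv W i j) →
      (∃ j < t, run = fv W i j) →
      bScan (W.drop t) i (t : Int) (some run) (t : Int) = (FR W i : Int) := by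
  intro n
  induction n with
  | zero =>
    intro t run hn h1 h2 h3 h4 h5
    have ht : t = W.length := by omega
    have hdrop : W.drop t = [] := by rw [ht]; exact List.drop_length
    rw [hdrop, bScan]
    have : FR W i = t := by
      rw [FR, Nat.findGreatest_eq_iff]
      refine ⟨h1, fun _ => ?_, fun n hlt hle => by omega⟩
      rw [feasB_iff]; intro j hj; exact le_trans h3 (h4 j hj)
    rw [this]
  | succ m ih =>
    intro t run hn h1 h2 h3 h4 h5
    have htlt : t < W.length := by omega
    have hfvt : W[t] + ((t : Int) + 1) - i = fv W i t := by
      rw [fv, List.getD_eq_getElem _ _ htlt]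
    rw [← List.getElem_cons_drop htlt]
    simp only [bScan]
    by_cases hlt : W[t] + ((t : Int) + 1) - i < run
    · rw [if_pos hlt]
      by_cases hgo : (t : Int) + 1 ≤ W[t] + ((t : Int) + 1) - i
      · rw [if_pos hgo]
        have := ih (t + 1) (W[t] + ((t : Int) + 1) - i) (by omega) (by omega) (by omega)
          (by push_cast; omega)
          (by
            intro j hj
            rcases Nat.lt_succ_iff_lt_or_eq.mp hj with hj' | hj'
            · exact le_trans (le_of_lt hlt) (h4 j hj')
            · subst hj'; rw [hfvt])
          ⟨t, Nat.lt_succ_self t, hfvt⟩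
        push_cast at this ⊢
        exact this
      · rw [if_neg hgo]
        have : FR W i = t := by
          rw [FR, Nat.findGreatest_eq_iff]
          refine ⟨le_of_lt htlt, fun _ => ?_, fun n hlt' hle' => ?_⟩
          · rw [feasB_iff]; intro j hj; exact le_trans h3 (h4 j hj)
          · rw [feasB_iff]; intro hfe
            have h1' := hfe t hlt'
            rw [← hfvt] at h1'
            have : ((t : Int) + 1) ≤ (n : Int) := by exact_mod_cast hlt'
            omega
        rw [this]
    · rw [if_neg hlt]
      by_cases hgo : (t : Int) + 1 ≤ run
      · rw [if_pos hgo]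
        have := ih (t + 1) run (by omega) (by omega) (by omega)
          (by push_cast; omega)
          (by
            intro j hj
            rcases Nat.lt_succ_iff_lt_or_eq.mp hj with hj' | hj'
            · exact h4 j hj'
            · subst hj'; rw [← hfvt]; omega)
          (by obtain ⟨j, hj, hje⟩ := h5; exact ⟨j, Nat.lt_succ_of_lt hj, hje⟩)
        push_cast at this ⊢
        exact this
      · rw [if_neg hgo]
        obtain ⟨j0, hj0, hje⟩ := h5
        have : FR W i = t := by
          rw [FR, Nat.findGreatest_eq_iff]
          refine ⟨le_of_lt htlt, fun _ => ?_, fun n hlt' hle' => ?_⟩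
          · rw [feasB_iff]; intro j hj; exact le_trans h3 (h4 j hj)
          · rw [feasB_iff]; intro hfe
            have h1' := hfe j0 (lt_of_lt_of_le hj0 (le_of_lt hlt'))
            rw [← hje] at h1'
            have : ((t : Int)) < (n : Int) := by exact_mod_cast hlt'
            omega
        rw [this]

lemma bScan_eq_FR (w : List Int) (i : Int) : bScan w i 0 none 0 = (FR w i : Int) := by
  cases w with
  | nil => rw [bScan]; rw [FR]; simp
  | cons v rest =>
    simp only [bScan]
    have hfv0 : fv (v :: rest) i 0 = v + (0 + 1) - i := by rw [fv]; rfl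
    by_cases hgo : (0 : Int) + 1 ≤ v + (0 + 1) - i
    · rw [if_pos hgo]
      have := bScan_inv (v :: rest) i ((v :: rest).length - 1) 1 (v + (0 + 1) - i)
        rfl (by simp) le_rfl (by push_cast at hgo ⊢; omega)
        (by intro j hj; interval_cases j; rw [hfv0])
        ⟨0, Nat.zero_lt_one, hfv0.symm⟩
      simpa using this
    · rw [if_neg hgo]
      have : FR (v :: rest) i = 0 := by
        rw [FR, Nat.findGreatest_eq_iff]
        refine ⟨Nat.zero_le _, fun h => absurd rfl h, fun n hlt' hle' => ?_⟩
        rw [feasB_iff]; intro hfe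
        have h1' := hfe 0 hlt'
        rw [hfv0] at h1'
        have : (1 : Int) ≤ (n : Int) := by exact_mod_cast hlt'
        omega
      rw [this]
      rfl

lemma G_eq_FR (u : List Int) : ∀ (i : Int), u.Pairwise (· ≤ ·) → G u i = (FR u.reverse i : Nat) := by
  induction u with
  | nil => intro i _; rw [G]; rw [List.reverse_nil, FR]; simp
  | cons x r ih =>
    intro i hp
    have hx : ∀ y ∈ r, x ≤ y := (List.pairwise_cons.mp hp).1
    have hr : r.Pairwise (· ≤ ·) := (List.pairwise_cons.mp hp).2
    have hlen : (x :: r).reverse.length = r.length + 1 := by simp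
    have hrev : (x :: r).reverse = r.reverse ++ [x] := List.reverse_cons ..
    -- getters of the reversed list
    have hget_lt : ∀ j < r.length, ((x :: r).reverse).getD j 0 = r.reverse.getD j 0 := by
      intro j hj
      rw [hrev]; exact List.getD_append _ _ _ j (by simpa using hj)
    have hget_last : ((x :: r).reverse).getD r.length 0 = x := by
      rw [hrev]; rw [List.getD_append_right _ _ _ _ (by simp)]; simp
    have hmem : ∀ j < r.length, x ≤ r.reverse.getD j 0 := by
      intro j hj
      have hj' : j < r.reverse.length := by simpa using hj
      rw [List.getD_eq_getElem _ _ hj']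
      exact hx _ (by
        have := List.getElem_mem hj'
        rwa [List.mem_reverse] at this)
    by_cases hxi : i ≤ x
    · rw [G, if_pos hxi, ih (i + 1) hr]
      set K := FR r.reverse (i + 1) with hKdef
      have hK : K ≤ r.length := by
        rw [hKdef, FR]
        simpa using Nat.findGreatest_le (P := fun k => feasB r.reverse (i + 1) k = true) r.reverse.length
      have hPK : feasB r.reverse (i + 1) K = true := by
        rw [hKdef, FR]
        exact Nat.findGreatest_spec (P := fun k => feasB r.reverse (i + 1) k = true) (Nat.zero_le _) (feasB_zero r.reverse (i + 1))
      rw [feasB_iff] at hPK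
      have hgoal : FR (x :: r).reverse i = K + 1 := by
        rw [FR, Nat.findGreatest_eq_iff]
        refine ⟨by omega, fun _ => ?_, fun n hlt' hle' => ?_⟩
        · rw [feasB_iff]
          intro j hj
          rcases Nat.lt_succ_iff_lt_or_eq.mp hj with hj' | hj'
          · have hjr : j < r.length := by omega
            rw [fv, hget_lt j hjr]
            have := hPK j hj'
            rw [fv] at this
            push_cast at this ⊢
            omega
          · subst hj'
            rcases Nat.lt_or_ge K r.length with hKlt | hKge
            · rw [fv, hget_lt K hKlt]
              have := hmem K hKlt
              push_cast
              omega
            · have hKeq : K = r.length := by omega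
              rw [fv, hKeq, hget_last]
              push_cast
              omega
        · rw [feasB_iff]
          intro hfe
          have hn1 : n - 1 ≤ r.length := by
            rw [hlen] at hle'; omega
          have hfeas : feasB r.reverse (i + 1) (n - 1) = true := by
            rw [feasB_iff]
            intro j hj
            have hjr : j < r.length := by omega
            have := hfe j (by omega)
            rw [fv, hget_lt j hjr] at this
            rw [fv]
            have hcast : ((n - 1 : Nat) : Int) = (n : Int) - 1 := by
              have : 1 ≤ n := by omega
              push_cast [this]; ring
            omega
          have hle2 : n - 1 ≤ K := by
            rw [hKdef, FR]
            simpa using Nat.le_findGreatest (P := fun k => feasB r.reverse (i + 1) k = true)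
              (by simpa using hn1) hfeas
          omega
      rw [hgoal]
      push_cast
      ring
    · rw [G, if_neg hxi, ih i hr]
      set K := FR r.reverse i with hKdef
      have hK : K ≤ r.length := by
        rw [hKdef, FR]
        simpa using Nat.findGreatest_le (P := fun k => feasB r.reverse i k = true) r.reverse.length
      have hPK : feasB r.reverse i K = true := by
        rw [hKdef, FR]
        exact Nat.findGreatest_spec (P := fun k => feasB r.reverse i k = true) (Nat.zero_le _) (feasB_zero r.reverse i)
      rw [feasB_iff] at hPK
      have hgoal : FR (x :: r).reverse i = K := by
        rw [FR, Nat.findGreatest_eq_iff]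
        refine ⟨by omega, fun _ => ?_, fun n hlt' hle' => ?_⟩
        · rw [feasB_iff]
          intro j hj
          have hjr : j < r.length := by omega
          rw [fv, hget_lt j hjr]
          have := hPK j hj
          rw [fv] at this
          exact this
        · rw [feasB_iff]
          intro hfe
          rcases Nat.lt_or_ge r.length n with hbig | hsmall
          · have hneq : n = r.length + 1 := by rw [hlen] at hle'; omega
            have := hfe r.length (by omega)
            rw [fv, hget_last] at this
            have hcast : ((r.length : Int) + 1) ≤ (n : Int) := by exact_mod_cast hbig
            omega
          · have hfeas : feasB r.reverse i n = true := by
              rw [feasB_iff]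
              intro j hj
              have hjr : j < r.length := by omega
              have := hfe j hj
              rwa [fv, hget_lt j hjr, ← fv] at this
            have hle2 : n ≤ K := by
              rw [hKdef, FR]
              simpa using Nat.le_findGreatest (P := fun k => feasB r.reverse i k = true)
                (by simpa using hsmall) hfeas
            omega
      rw [hgoal]

lemma perI (s : List Int) (hs : s.Pairwise (· ≤ ·)) (i : Int) (acc : Int) :
    max acc (aGreedy ((PySem.List.slice s (some (i - 1)) none).map (fun x => x)) i 0)
      = max acc (bScan ((PySem.List.slice s (some (i - 1)) none).reverse) i 0 none 0) := by
  have hmap : (PySem.List.slice s (some (i - 1)) none).map (fun x => x)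
      = PySem.List.slice s (some (i - 1)) none := by simp
  have hu : (PySem.List.slice s (some (i - 1)) none).Pairwise (· ≤ ·) := by
    rw [PySem.List.slice_some_none]
    exact List.Pairwise.sublist (List.drop_sublist _ _) hs
  rw [hmap, aGreedy_eq_G, bScan_eq_FR, zero_add, add_zero, G_eq_FR _ i hu]

-- ===== VERDICT (by name: the statement is the Claim_ definition above) =====
theorem generate_spec : Claim_equal_generate := by
  intro d _hdom hpre
  unfold Spec_generate generate generate_alt
  cases hmin : PySem.List.min? d (fun x => x) with
  | none => simp
  | some mn =>
    simp only
    apply PySem.List.foldl_congr_mem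
    intro acc i _hi
    exact perI (PySem.List.sorted d (fun x => x) false)
      (PySem.List.sorted_pairwise d (fun x => x)) i acc
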